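-- pv_equiv track=rewrite | github.com/sykesey/ake | ake/ingestion/amorphous_pipeline.py | _semantic_role
-- ===== SOURCE A (Python) =====
-- _CURRENCY_HINTS = frozenset({"amount", "price", "cost", "revenue", "salary", "budget", "fee", "wage"})
--
-- _DATE_HINTS = frozenset({"date", "_at", "_on", "timestamp", "_time"})
--
-- _CAT_HINTS = frozenset({"status", "category", "department", "region", "type", "remote", "gender", "kind", "role"})
--
-- _MEASURE_HINTS = frozenset({"count", "quantity", "qty", "hours", "headcount", "score", "num_", "total_"})
--
-- _TEXT_HINTS = frozenset({"description", "notes", "comment", "text", "summary", "bio"})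
--
-- _LABEL_SET = frozenset({"name", "title", "label", "display_name", "full_name"})
--
-- def _semantic_role(col_name: str, table_name: str = "") -> str:
--     """Classify a column's semantic role from its name and owning table name."""
--     col = col_name.lower()
--
--     # Primary key: "id" or "{singular_table}_id"
--     singular = table_name.rstrip("s") if table_name.endswith("s") else table_name
--     if col == "id" or col == f"{singular}_id" or col == f"{table_name}_id":
--         return "entity_id"
--
--     # Foreign key (any other *_id column)
--     if col.endswith("_id"):
--         return "foreign_key"
--
--     if col in _LABEL_SET:
--         return "label"
--     if any(h in col for h in _CURRENCY_HINTS):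
--         return "currency"
--     if any(h in col for h in _DATE_HINTS):
--         return "date"
--     if any(h in col for h in _CAT_HINTS):
--         return "categorical"
--     if any(h in col for h in _MEASURE_HINTS):
--         return "measure"
--     if col.startswith("is_") or col.startswith("has_"):
--         return "boolean"
--     if any(h in col for h in _TEXT_HINTS):
--         return "text"
--     return "unknown"
-- ===== SOURCE B (Python) =====
-- _CURRENCY = ("amount", "price", "cost", "revenue", "salary", "budget", "fee", "wage")
-- _DATE = ("date", "_at", "_on", "timestamp", "_time")
-- _CAT = ("status", "category", "department", "region", "type", "remote", "gender", "kind", "role")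
-- _MEASURE = ("count", "quantity", "qty", "hours", "headcount", "score", "num_", "total_")
-- _TEXT = ("description", "notes", "comment", "text", "summary", "bio")
-- _LABELS = ("name", "title", "label", "display_name", "full_name")
--
-- _ROLES = {0: "currency", 1: "date", 2: "categorical", 3: "measure", 4: "boolean", 5: "text"}
-- _BOOL_PRIO = 4
--
-- # one flat substring-hint -> priority table (groups listed in cascade order)
-- _HINT_PRIO = {}
-- for _hints, _prio in ((_CURRENCY, 0), (_DATE, 1), (_CAT, 2), (_MEASURE, 3), (_TEXT, 5)):
--     for _h in _hints:
--         _HINT_PRIO[_h] = _prio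
--
--
-- def _semantic_role(col_name: str, table_name: str = "") -> str:
--     """Classify a column's semantic role: keep the key/label head rules, then take
--     the best (lowest-priority) match over one flat hint table instead of a cascade."""
--     col = col_name.lower()
--     singular = table_name.rstrip("s")
--     if col in ("id", singular + "_id", table_name + "_id"):
--         return "entity_id"
--     if col.endswith("_id"):
--         return "foreign_key"
--     if col in _LABELS:
--         return "label"
--     best = None
--     for hint, prio in _HINT_PRIO.items():
--         if hint in col and (best is None or prio < best):
--             best = prio
--     for pref in ("is_", "has_"):
--         if col.startswith(pref) and (best is None or _BOOL_PRIO < best):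
--             best = _BOOL_PRIO
--     return _ROLES.get(best, "unknown")
-- ===== Notes on version B (the rewrite author's own statement) =====
-- stated objective: alternative
-- what changed: The cascade of per-category any(hint in col) checks is replaced by a single fold over one flat hint->priority table (plus two prefix rules) that keeps the lowest-priority match and maps it to a role at the end; the endswith-guarded table-name singularisation becomes one unconditional rstrip.
import Mathlib
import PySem

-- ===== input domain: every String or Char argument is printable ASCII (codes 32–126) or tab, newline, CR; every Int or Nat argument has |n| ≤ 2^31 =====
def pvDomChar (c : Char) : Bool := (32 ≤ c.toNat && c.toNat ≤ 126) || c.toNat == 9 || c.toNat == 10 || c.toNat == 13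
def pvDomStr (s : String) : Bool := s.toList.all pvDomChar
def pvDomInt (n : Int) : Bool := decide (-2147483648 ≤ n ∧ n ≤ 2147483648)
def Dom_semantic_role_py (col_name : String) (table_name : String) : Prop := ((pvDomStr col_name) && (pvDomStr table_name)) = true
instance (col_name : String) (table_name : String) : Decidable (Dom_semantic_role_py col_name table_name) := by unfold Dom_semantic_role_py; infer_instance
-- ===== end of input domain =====

-- B replaces A's cascade of per-group any(...) checks by one flat hint→priority table
-- folded once, keeping the lowest-priority match (objective: alternative, same cost).


-- ===== PORT A =====
-- s.rstrip("s"): PySem has no rstrip-with-chars, ported by hand; exact (drops all trailing 's').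
def pvRstripS (s : String) : String := String.ofList ((s.toList.reverse.dropWhile (fun c => c == 's')).reverse)

-- f"{x}_id": string concatenation via PySem.Str.join (kernel-reducible).
def pvIdOf (s : String) : String := PySem.Str.join "" [s, "_id"]

def pvCurrencyHints : List String := ["amount", "price", "cost", "revenue", "salary", "budget", "fee", "wage"]
def pvDateHints : List String := ["date", "_at", "_on", "timestamp", "_time"]
def pvCatHints : List String := ["status", "category", "department", "region", "type", "remote", "gender", "kind", "role"]
def pvMeasureHints : List String := ["count", "quantity", "qty", "hours", "headcount", "score", "num_", "total_"]
def pvTextHints : List String := ["description", "notes", "comment", "text", "summary", "bio"]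
def pvLabelSet : List String := ["name", "title", "label", "display_name", "full_name"]

def semantic_role_py (col_name : String) (table_name : String) : String :=
  let col := PySem.Str.lower col_name
  let singular := if PySem.Str.endswith table_name "s" then pvRstripS table_name else table_name
  if col == "id" || col == pvIdOf singular || col == pvIdOf table_name then "entity_id"
  else if PySem.Str.endswith col "_id" then "foreign_key"
  else if pvLabelSet.any (fun h => col == h) then "label"
  else if pvCurrencyHints.any (fun h => PySem.Str.isIn h col) then "currency"
  else if pvDateHints.any (fun h => PySem.Str.isIn h col) then "date"
  else if pvCatHints.any (fun h => PySem.Str.isIn h col) then "categorical"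
  else if pvMeasureHints.any (fun h => PySem.Str.isIn h col) then "measure"
  else if PySem.Str.startswith col "is_" || PySem.Str.startswith col "has_" then "boolean"
  else if pvTextHints.any (fun h => PySem.Str.isIn h col) then "text"
  else "unknown"

-- ===== PORT B =====
def pvRoles : PySem.Dict Int String :=
  PySem.Dict.ofList [(0, "currency"), (1, "date"), (2, "categorical"), (3, "measure"), (4, "boolean"), (5, "text")]

-- _HINT_PRIO built group by group, exactly as Source B's loop builds its dict (insertion order).
def pvHintPrio : List (String × Int) :=
  pvCurrencyHints.map (fun h => (h, (0 : Int))) ++ pvDateHints.map (fun h => (h, (1 : Int))) ++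
  pvCatHints.map (fun h => (h, (2 : Int))) ++ pvMeasureHints.map (fun h => (h, (3 : Int))) ++
  pvTextHints.map (fun h => (h, (5 : Int)))

-- body of Source B's hint loop: if hint in col and (best is None or prio < best): best = prio
def pvHintStep (col : String) (best : Option Int) (hp : String × Int) : Option Int :=
  if PySem.Str.isIn hp.1 col && best.elim true (fun b => decide (hp.2 < b)) then some hp.2 else best

-- body of Source B's prefix loop: if col.startswith(pref) and (best is None or 4 < best): best = 4
def pvPrefStep (col : String) (best : Option Int) (pref : String) : Option Int :=
  if PySem.Str.startswith col pref && best.elim true (fun b => decide ((4 : Int) < b)) then some 4 else best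

def semantic_role_py_alt (col_name : String) (table_name : String) : String :=
  let col := PySem.Str.lower col_name
  let singular := pvRstripS table_name
  if col == "id" || col == pvIdOf singular || col == pvIdOf table_name then "entity_id"
  else if PySem.Str.endswith col "_id" then "foreign_key"
  else if pvLabelSet.any (fun h => col == h) then "label"
  else
    let best := pvHintPrio.foldl (pvHintStep col) none
    let best := ["is_", "has_"].foldl (pvPrefStep col) best
    -- _ROLES.get(best, "unknown"): a None key is never present, an int key is looked up
    match best with
    | none => "unknown"
    | some b => PySem.Dict.getD pvRoles b "unknown"

-- ===== PRECONDITION & SPEC =====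
def Spec_semantic_role_py (col_name : String) (table_name : String) (out : String) : Prop := out = semantic_role_py_alt col_name table_name
instance (col_name : String) (table_name : String) (out : String) : Decidable (Spec_semantic_role_py col_name table_name out) := by unfold Spec_semantic_role_py; infer_instance

-- ===== CLAIM (what is proved, stated in full; the proofs are below) =====
def Claim_equal_semantic_role_py : Prop := ∀ (col_name : String) (table_name : String), Dom_semantic_role_py col_name table_name → Spec_semantic_role_py col_name table_name (semantic_role_py col_name table_name)

-- ===== LEMMAS AND PROOFS =====

-- if table_name does not end in "s", rstrip("s") is the identity
theorem pvRstripS_of_not_endswith (s : String) (h : PySem.Str.endswith s "s" = false) :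
    pvRstripS s = s := by
  unfold pvRstripS
  have h' : ¬ (['s'] <+: s.toList.reverse) := by
    intro hp
    rw [PySem.Str.endswith_eq] at h
    rw [Bool.eq_false_iff] at h
    apply h
    rw [PySem.Chars.endswith_iff]
    show ("s".toList) <:+ s.toList
    have : ('s' :: ([] : List Char)).reverse <+: s.toList.reverse := by simpa using hp
    rw [List.reverse_prefix] at this
    simpa using this
  rcases hr : s.toList.reverse with _ | ⟨c, t⟩
  · have h0 : s.toList = [] := by simpa using hr
    simpa using String.ofList_eq.mpr h0.symm
  · have hc : c ≠ 's' := by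
      intro rfl0
      exact h' (by rw [hr, rfl0]; exact ⟨t, rfl⟩)
    rw [hr] at h'
    rw [List.dropWhile_cons_of_neg (by simpa using hc)]
    rw [← hr, List.reverse_reverse]
    simp

-- the fold keeps an accumulator no later (≥) priority can replace
theorem pvFold_keep (col : String) (R : List (String × Int)) (b : Int)
    (hR : ∀ x ∈ R, b ≤ x.2) : R.foldl (pvHintStep col) (some b) = some b := by
  induction R with
  | nil => rfl
  | cons x R ih =>
    have hx : b ≤ x.2 := hR x (by simp)
    have : pvHintStep col (some b) x = some b := by
      unfold pvHintStep
      have : decide (x.2 < b) = false := by simp; omega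
      simp [this]
    rw [List.foldl_cons, this]
    exact ih (fun y hy => hR y (by simp [hy]))

-- a constant-priority group yields its priority iff some hint of it matches
theorem pvFold_group (col : String) (G : List String) (p : Int) :
    (G.map (fun h => (h, p))).foldl (pvHintStep col) none =
      if G.any (fun h => PySem.Str.isIn h col) then some p else none := by
  induction G with
  | nil => rfl
  | cons g G ih =>
    by_cases hg : PySem.Str.isIn g col = true
    · have hg2 : PySem.Chars.isIn g.toList col.toList = true := by
        rw [← PySem.Str.isIn_eq]; exact hg
      have : pvHintStep col none (g, p) = some p := by unfold pvHintStep; simp [hg2]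
      rw [List.map_cons, List.foldl_cons, this,
        pvFold_keep col _ p (by intro x hx; simp at hx; obtain ⟨a, _, rfl⟩ := hx; exact le_refl p)]
      simp [hg2]
    · have hg2 : PySem.Chars.isIn g.toList col.toList = false := by
        rw [← PySem.Str.isIn_eq]; exact Bool.eq_false_iff.mpr hg
      have : pvHintStep col none (g, p) = none := by
        unfold pvHintStep; simp [hg2]
      rw [List.map_cons, List.foldl_cons, this, ih]
      simp [hg2]

-- B's hint fold over the whole table = priority of the first matching group
theorem pvFold_table (col : String) :
    pvHintPrio.foldl (pvHintStep col) none =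
      if pvCurrencyHints.any (fun h => PySem.Str.isIn h col) then some 0
      else if pvDateHints.any (fun h => PySem.Str.isIn h col) then some 1
      else if pvCatHints.any (fun h => PySem.Str.isIn h col) then some 2
      else if pvMeasureHints.any (fun h => PySem.Str.isIn h col) then some 3
      else if pvTextHints.any (fun h => PySem.Str.isIn h col) then some 5
      else none := by
  unfold pvHintPrio
  rw [List.foldl_append, List.foldl_append, List.foldl_append, List.foldl_append, pvFold_group]
  by_cases h0 : pvCurrencyHints.any (fun h => PySem.Str.isIn h col) = true
  · rw [if_pos h0, if_pos h0, pvFold_keep, pvFold_keep, pvFold_keep, pvFold_keep] <;>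
      (intro x hx; obtain ⟨a, -, rfl⟩ := List.mem_map.mp hx; simp)
  · rw [if_neg h0, if_neg h0, pvFold_group]
    by_cases h1 : pvDateHints.any (fun h => PySem.Str.isIn h col) = true
    · rw [if_pos h1, if_pos h1, pvFold_keep, pvFold_keep, pvFold_keep] <;>
        (intro x hx; obtain ⟨a, -, rfl⟩ := List.mem_map.mp hx; simp)
    · rw [if_neg h1, if_neg h1, pvFold_group]
      by_cases h2 : pvCatHints.any (fun h => PySem.Str.isIn h col) = true
      · rw [if_pos h2, if_pos h2, pvFold_keep, pvFold_keep] <;>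
          (intro x hx; obtain ⟨a, -, rfl⟩ := List.mem_map.mp hx; simp)
      · rw [if_neg h2, if_neg h2, pvFold_group]
        by_cases h3 : pvMeasureHints.any (fun h => PySem.Str.isIn h col) = true
        · rw [if_pos h3, if_pos h3, pvFold_keep]
          intro x hx; obtain ⟨a, -, rfl⟩ := List.mem_map.mp hx; simp
        · rw [if_neg h3, if_neg h3, pvFold_group]

-- ===== VERDICT (by name: the statement is the Claim_ definition above) =====
set_option maxHeartbeats 1000000 in
theorem semantic_role_py_spec : Claim_equal_semantic_role_py := by
  intro col_name table_name _
  unfold Spec_semantic_role_py semantic_role_py semantic_role_py_alt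
  dsimp only
  have hsing : (if PySem.Str.endswith table_name "s" = true then pvRstripS table_name else table_name)
      = pvRstripS table_name := by
    by_cases h : PySem.Str.endswith table_name "s" = true
    · rw [if_pos h]
    · rw [if_neg h]; exact (pvRstripS_of_not_endswith _ (Bool.eq_false_iff.mpr h)).symm
  rw [hsing, pvFold_table (PySem.Str.lower col_name)]
  by_cases his : PySem.Str.startswith (PySem.Str.lower col_name) "is_" = true <;>
    by_cases hhas : PySem.Str.startswith (PySem.Str.lower col_name) "has_" = true <;>
    split_ifs <;> first | rfl | (simp_all [pvPrefStep, pvRoles]; try rfl)
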